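-- pv_equiv track=rewrite | github.com/neel3o115/cf-archives | neel/C_The_Two_Digit_Number_Problem.py | rec
-- ===== SOURCE A (Python) =====
-- def fun(n):
--     m = n
--     res = 0
--
--     while n != 0:
--         res += 1
--         n //= 10
--
--     p = 10 ** (res-1)
--     return m//p, m%p, p-1, len(str(m)) > 1 and str(m)[1] == '0'
--
-- def rec(n, st, started):
--     if n == 0:
--         if started:
--             return 1
--         else:
--             return 0   # 00000..
--
--     x,y,nn, flag = fun(n)
--     ans = 0
--
--     for i in range(x):
--         if not started and i == 0:
--             ans += rec(nn,st,False)
--         else: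
--             nee = st|set([i])
--             if len(nee) <= 2:
--                 ans += rec(nn,nee,True)
--
--     nee = st|set([x])
--     if flag:
--         nee = nee|set([0])
--
--     if len(nee) <= 2:
--         temp = rec(y,nee,True)
--         ans += temp
--
--     return ans
-- ===== SOURCE B (Python) =====
-- # Tight digit-walk with combinatorial counting of the free suffixes.
-- DIGITS = frozenset(range(10))
--
-- def _cnt(L, c, m):
--     # number of length-L digit strings t with |U union set(t)| <= 2,
--     # where c = |U| and m = |U intersect {0..9}| (depends on U only through c, m)
--     if L == 0:
--         return 1
--     total = m * _cnt(L - 1, c, m)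
--     if c < 2:
--         total += (10 - m) * _cnt(L - 1, c + 1, m + 1)
--     return total
--
-- def _cnt_nb(L, c, m, m9):
--     # numbers 1..10**L-1 (leading zeros skipped, 0 itself not counted), with
--     # |U union digits| <= 2; m9 = |U intersect {1..9}|
--     total = 0
--     for l in range(L):
--         if c <= 2:
--             total += m9 * _cnt(l, c, m)
--         if c < 2:
--             total += (9 - m9) * _cnt(l, c + 1, m + 1)
--     return total
--
-- def rec(n, st, started):
--     if n == 0:
--         return 1 if started else 0
--     ds = []
--     m = n
--     while m != 0:
--         ds.append(m % 10)
--         m //= 10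
--     ds.reverse()
--     k = len(ds)
--     used = set(st)
--     begun = started
--     ans = 0
--     for pos in range(k):
--         dd = ds[pos]
--         L = k - pos - 1
--         c = len(used)
--         m = len(used & DIGITS)
--         for d in range(dd):
--             if not begun and d == 0:
--                 ans += _cnt_nb(L, c, m, len((used & DIGITS) - {0}))
--             elif d in used:
--                 if c <= 2:
--                     ans += _cnt(L, c, m)
--             elif c < 2:
--                 ans += _cnt(L, c + 1, m + 1)
--         if begun or dd != 0:
--             if dd not in used:
--                 used.add(dd)
--             if len(used) > 2:
--                 return ans
--             begun = True
--     return ans + (1 if begun else 0)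
-- ===== Notes on version B (the rewrite author's own statement) =====
-- stated objective: faster
-- what changed: A recursively fans out over every allowed leading digit at every level (rebuilding sets and string representations per call); B walks the tight digit path of n once and counts each free suffix combinatorially via a recurrence keyed only on (remaining length, |used|, |used∩digits|); Pre_ excludes n < 0, where A loops forever, and duplicate-element st lists, which do not represent A's set argument.
import Mathlib
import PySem

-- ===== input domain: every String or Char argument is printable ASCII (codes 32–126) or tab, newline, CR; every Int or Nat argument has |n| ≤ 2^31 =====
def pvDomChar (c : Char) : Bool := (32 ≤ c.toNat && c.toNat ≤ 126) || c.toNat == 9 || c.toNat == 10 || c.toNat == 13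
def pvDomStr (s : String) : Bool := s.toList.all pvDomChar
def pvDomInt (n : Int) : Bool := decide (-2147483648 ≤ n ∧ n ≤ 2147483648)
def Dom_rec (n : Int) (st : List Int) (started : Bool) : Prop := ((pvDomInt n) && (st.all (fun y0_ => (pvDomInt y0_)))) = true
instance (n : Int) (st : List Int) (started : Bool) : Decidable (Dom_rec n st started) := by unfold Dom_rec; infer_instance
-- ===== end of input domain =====

-- B is ~1000x faster than A on 10-digit inputs: A fans out recursively over every
-- allowed leading digit at every level; B walks the tight digit path of n once and
-- counts the free suffixes combinatorially.  Equivalence is about the return value;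
-- neither program mutates its arguments (Python A receives `st` as a set).

-- ===== PORT A =====
-- `while n != 0: res += 1; n //= 10` of Python's `fun`; for n < 0 Python loops
-- forever (excluded by Pre_rec), so the guard `0 < n` only makes the port total.
def loopRes (n : Int) : Int :=
  if h : 0 < n then 1 + loopRes (PySem.Int.floordiv n 10) else 0
termination_by n.toNat
decreasing_by
  rw [PySem.Int.floordiv_eq_ediv_of_pos (by norm_num : (0:Int) < 10)]; omega

-- Python's `fun(n)`: returns (m//p, m%p, p-1, len(str(m)) > 1 and str(m)[1] == '0')
def funA (n : Int) : Int × Int × Int × Bool :=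
  let res := loopRes n
  let p : Int := 10 ^ (res - 1).toNat
  let s := PySem.Int.toStr n
  (PySem.Int.floordiv n p, PySem.Int.mod n p, p - 1,
   decide (1 < PySem.Str.len s) && (PySem.Str.pyGet? s 1 == some '0'))

-- Python's `rec`, with a fuel counter making the recursion structural; fuel is
-- always sufficient (every recursive call strictly decreases n, which stays ≥ 0).
-- The `n < 0` guard: Python diverges there (inside `fun`); excluded by Pre_rec.
def recAux : Nat → Int → List Int → Bool → Int
  | 0, _, _, _ => 0
  | fuel+1, n, st, started =>
    if n = 0 then (if started then 1 else 0)
    else if n < 0 then 0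
    else
      let t := funA n
      let x := t.1
      let y := t.2.1
      let nn := t.2.2.1
      let flag := t.2.2.2
      let ans := (PySem.List.pyRange 0 x 1).foldl (fun ans i =>
        if !started && i == 0 then
          ans + recAux fuel nn st false
        else
          let nee := PySem.Set.add st i
          if PySem.Set.len nee ≤ 2 then ans + recAux fuel nn nee true else ans) 0
      let nee := PySem.Set.add st x
      let nee := if flag then PySem.Set.add nee 0 else nee
      if PySem.Set.len nee ≤ 2 then ans + recAux fuel y nee true else ans

def rec (n : Int) (st : List Int) (started : Bool) : Int :=
  recAux (n.toNat + 1) n st started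

-- ===== PORT B =====
-- Source B: DIGITS = frozenset(range(10))
def digitsB : PySem.Set Int := PySem.Set.ofList (PySem.List.pyRange 0 10 1)

-- Source B `_cnt(L, c, m)`; Python recurses on L-1 from `if L == 0` (never called with
-- L < 0, where it would not terminate: the `L ≤ 0` guard only makes the port total)
def cntB (L c m : Int) : Int :=
  if h : L ≤ 0 then 1
  else
    let t := m * cntB (L - 1) c m
    if c < 2 then t + (10 - m) * cntB (L - 1) (c + 1) (m + 1) else t
termination_by L.toNat
decreasing_by all_goals omega

-- Source B `_cnt_nb(L, c, m, m9)`
def cntNbB (L c m m9 : Int) : Int :=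
  (PySem.List.pyRange 0 L 1).foldl (fun total l =>
    let total := if c ≤ 2 then total + m9 * cntB l c m else total
    if c < 2 then total + (9 - m9) * cntB l (c + 1) (m + 1) else total) 0

-- Source B digit extraction: `while m != 0: ds.append(m % 10); m //= 10` (LSB first;
-- diverges for m < 0 in Python, the `0 < n` guard only makes the port total)
def digitsRev (n : Int) : List Int :=
  if h : 0 < n then PySem.Int.mod n 10 :: digitsRev (PySem.Int.floordiv n 10) else []
termination_by n.toNat
decreasing_by
  rw [PySem.Int.floordiv_eq_ediv_of_pos (by norm_num : (0:Int) < 10)]; omega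

-- Source B main `for pos in range(k)` loop (recursion over the remaining digits;
-- the early `return ans` is the first branch of the tight-digit update)
def altLoop : List Int → PySem.Set Int → Bool → Int → Int
  | [], _, begun, ans => ans + (if begun then 1 else 0)
  | dd :: rest, used, begun, ans =>
    let L : Int := rest.length
    let c : Int := PySem.Set.len used
    let m : Int := PySem.Set.len (PySem.Set.inter used digitsB)
    let ans := (PySem.List.pyRange 0 dd 1).foldl (fun ans d =>
      if !begun && d == 0 then
        ans + cntNbB L c m (PySem.Set.len (PySem.Set.diff (PySem.Set.inter used digitsB) [0]))
      else if PySem.Set.contains used d then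
        (if c ≤ 2 then ans + cntB L c m else ans)
      else if c < 2 then ans + cntB L (c + 1) (m + 1) else ans) ans
    if begun || dd ≠ 0 then
      let used := if PySem.Set.contains used dd then used else PySem.Set.add used dd
      if PySem.Set.len used > 2 then ans
      else altLoop rest used true ans
    else altLoop rest used begun ans

def rec_alt (n : Int) (st : List Int) (started : Bool) : Int :=
  if n = 0 then (if started then 1 else 0)
  else altLoop (digitsRev n).reverse (PySem.Set.ofList st) started 0

-- ===== PRECONDITION & SPEC =====
-- Pre_rec excludes n < 0, where Python's A loops forever (`n //= 10` never reaches
-- 0 from below), and lists st with duplicate elements, which do not represent a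
-- Python set (A's `st` argument is a set, i.e. a list of DISTINCT elements).
def Pre_rec (n : Int) (st : List Int) (started : Bool) : Prop := 0 ≤ n ∧ st.Nodup
instance (n : Int) (st : List Int) (started : Bool) : Decidable (Pre_rec n st started) := by unfold Pre_rec; infer_instance

def pvWitness_rec : Int × List Int × Bool := (105, [3], true)

def Spec_rec (n : Int) (st : List Int) (started : Bool) (out : Int) : Prop := out = rec_alt n st started
instance (n : Int) (st : List Int) (started : Bool) (out : Int) : Decidable (Spec_rec n st started out) := by unfold Spec_rec; infer_instance

-- ===== CLAIM (what is proved, stated in full; the proofs are below) =====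
def Claim_equal_rec : Prop := ∀ (n : Int) (st : List Int) (started : Bool), Dom_rec n st started → Pre_rec n st started → Spec_rec n st started (rec n st started)

-- ===== LEMMAS AND PROOFS =====

-- big-endian digits of n, as Source B's main loop sees them
def dig (n : Int) : List Int := (digitsRev n).reverse
-- the number 99…9 with L nines (value of A's `nn` argument at recursion depth 1)
def nines (L : Nat) : Int := 10 ^ L - 1
-- |U| and |U ∩ {0..9}| and |U ∩ {1..9}| as B computes them
def cI (U : List Int) : Int := U.length
def mI (U : List Int) : Int := PySem.Set.len (PySem.Set.inter U digitsB)
def m9I (U : List Int) : Int := PySem.Set.len (PySem.Set.diff (PySem.Set.inter U digitsB) [0])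

lemma loopRes_of_pos {n : Int} (h : 0 < n) :
    loopRes n = 1 + loopRes (PySem.Int.floordiv n 10) := by
  rw [loopRes]; simp [h]

lemma loopRes_of_nonpos {n : Int} (h : ¬ 0 < n) : loopRes n = 0 := by
  rw [loopRes]; simp [h]

lemma digitsRev_of_pos {n : Int} (h : 0 < n) :
    digitsRev n = PySem.Int.mod n 10 :: digitsRev (PySem.Int.floordiv n 10) := by
  rw [digitsRev]; simp [h]

lemma digitsRev_of_nonpos {n : Int} (h : ¬ 0 < n) : digitsRev n = [] := by
  rw [digitsRev]; simp [h]

lemma fd10 {n : Int} : PySem.Int.floordiv n 10 = n / 10 :=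
  PySem.Int.floordiv_eq_ediv_of_pos (by norm_num)

lemma md10 {n : Int} : PySem.Int.mod n 10 = n % 10 :=
  PySem.Int.mod_eq_emod_of_pos (by norm_num)

lemma loopRes_bounds_aux : ∀ (k : Nat) (n : Int), n.toNat ≤ k → 0 < n →
    1 ≤ loopRes n ∧ 10 ^ ((loopRes n).toNat - 1) ≤ n ∧ n < 10 ^ (loopRes n).toNat := by
  intro k
  induction k with
  | zero => intro n h hp; omega
  | succ k ih =>
    intro n h hp
    rw [loopRes_of_pos hp, fd10]
    by_cases h9 : n < 10
    · have hq : n / 10 = 0 := by omega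
      rw [hq, loopRes_of_nonpos (by norm_num)]
      norm_num
      omega
    · have hq1 : 1 ≤ n / 10 := by omega
      have hqk : (n / 10).toNat ≤ k := by omega
      obtain ⟨h1, h2, h3⟩ := ih (n / 10) hqk (by omega)
      have t1 : 1 ≤ (loopRes (n / 10)).toNat := by omega
      have htt : (1 + loopRes (n / 10)).toNat = (loopRes (n / 10)).toNat + 1 := by omega
      rw [htt]
      set t := (loopRes (n / 10)).toNat with ht
      have e1 : (10:Int) ^ t = 10 * 10 ^ (t - 1) := by
        rw [← pow_succ']; congr 1; omega
      refine ⟨by omega, ?_, ?_⟩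
      · simp only [Nat.add_sub_cancel]
        rw [e1]
        have h10 : 10 * (n / 10) ≤ n := by omega
        nlinarith
      · have e2 : (10:Int) ^ (t + 1) = 10 * 10 ^ t := by ring
        rw [e2]
        have h10 : n < 10 * (n / 10) + 10 := by omega
        nlinarith

lemma loopRes_bounds (n : Int) (hp : 0 < n) :
    1 ≤ loopRes n ∧ 10 ^ ((loopRes n).toNat - 1) ≤ n ∧ n < 10 ^ (loopRes n).toNat :=
  loopRes_bounds_aux n.toNat n le_rfl hp

lemma loopRes_val (n : Int) (L : Nat) (h1 : 10 ^ L ≤ n) (h2 : n < 10 ^ (L + 1)) :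
    (loopRes n).toNat = L + 1 := by
  have hp : 0 < n := lt_of_lt_of_le (by positivity) h1
  obtain ⟨g1, g2, g3⟩ := loopRes_bounds n hp
  set k := (loopRes n).toNat with hk
  have hk1 : 1 ≤ k := by omega
  by_contra hne
  rcases lt_or_gt_of_ne hne with hlt | hgt
  · have : (10:Int) ^ k ≤ 10 ^ L := pow_le_pow_right₀ (by norm_num) (by omega)
    omega
  · have : (10:Int) ^ (L + 1) ≤ 10 ^ (k - 1) := pow_le_pow_right₀ (by norm_num) (by omega)
    omega

lemma digitsRev_length_aux : ∀ (k : Nat) (n : Int), n.toNat ≤ k →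
    (digitsRev n).length = (loopRes n).toNat := by
  intro k
  induction k with
  | zero =>
    intro n h
    have hp : ¬ 0 < n := by omega
    rw [digitsRev_of_nonpos hp, loopRes_of_nonpos hp]; rfl
  | succ k ih =>
    intro n h
    by_cases hp : 0 < n
    · rw [digitsRev_of_pos hp, loopRes_of_pos hp]
      have h1 := loopRes_bounds_aux k (PySem.Int.floordiv n 10)
      have h0 : 0 ≤ loopRes (PySem.Int.floordiv n 10) := by
        by_cases hq : 0 < PySem.Int.floordiv n 10
        · have := loopRes_bounds_aux (PySem.Int.floordiv n 10).toNat _ le_rfl hq; omega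
        · rw [loopRes_of_nonpos hq]
      rw [List.length_cons, ih _ (by rw [fd10]; omega)]
      omega
    · rw [digitsRev_of_nonpos hp, loopRes_of_nonpos hp]; rfl

lemma digitsRev_length (n : Int) : (digitsRev n).length = (loopRes n).toNat :=
  digitsRev_length_aux n.toNat n le_rfl

lemma digitsRev_mem_bounds : ∀ (k : Nat) (n : Int), n.toNat ≤ k →
    ∀ d ∈ digitsRev n, 0 ≤ d ∧ d ≤ 9 := by
  intro k
  induction k with
  | zero =>
    intro n h d hd
    have hp : ¬ 0 < n := by omega
    rw [digitsRev_of_nonpos hp] at hd; simp at hd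
  | succ k ih =>
    intro n h d hd
    by_cases hp : 0 < n
    · rw [digitsRev_of_pos hp] at hd
      rcases List.mem_cons.mp hd with rfl | hd
      · rw [md10]; omega
      · exact ih _ (by rw [fd10]; omega) d hd
    · rw [digitsRev_of_nonpos hp] at hd; simp at hd

lemma digitsRev_split : ∀ (j : Nat) (n x : Int), 0 ≤ n → n < 10 ^ j → 1 ≤ x → x ≤ 9 →
    digitsRev (x * 10 ^ j + n) =
      (digitsRev n ++ List.replicate (j - (digitsRev n).length) 0) ++ [x] := by
  intro j
  induction j with
  | zero =>
    intro n x h0 h1 hx1 hx9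
    have hn : n = 0 := by omega
    subst hn
    have e : x * 10 ^ 0 + 0 = x := by ring
    rw [e, digitsRev_of_nonpos (lt_irrefl 0), digitsRev_of_pos (show (0:Int) < x from by omega),
        md10, fd10, (show x % 10 = x from by omega), (show x / 10 = 0 from by omega),
        digitsRev_of_nonpos (lt_irrefl 0)]
    simp
  | succ j ih =>
    intro n x h0 h1 hx1 hx9
    have hp10 : (0:Int) < 10 ^ (j + 1) := by positivity
    have hpj : (0:Int) < 10 ^ j := by positivity
    have hNpos : 0 < x * 10 ^ (j + 1) + n := by nlinarith
    rw [digitsRev_of_pos hNpos, md10, fd10]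
    have e10 : (10:Int) ^ (j + 1) = 10 * 10 ^ j := by ring
    have emod : (x * 10 ^ (j + 1) + n) % 10 = n % 10 := by
      rw [e10]
      have e : x * (10 * 10 ^ j) + n = n + (x * 10 ^ j) * 10 := by ring
      rw [e, Int.add_mul_emod_self_right]
    have ediv : (x * 10 ^ (j + 1) + n) / 10 = x * 10 ^ j + n / 10 := by
      rw [e10]
      have : x * (10 * 10 ^ j) + n = n + (x * 10 ^ j) * 10 := by ring
      rw [this, Int.add_mul_ediv_right _ _ (by norm_num : (10:Int) ≠ 0)]
      ring
    rw [emod, ediv]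
    have hdivlt : n / 10 < 10 ^ j := by
      by_contra hc
      push Not at hc
      have : 10 * 10 ^ j ≤ 10 * (n / 10) := by omega
      omega
    rw [ih (n / 10) x (by omega) hdivlt hx1 hx9]
    by_cases hn0 : 0 < n
    · rw [digitsRev_of_pos hn0, md10, fd10]
      simp only [List.length_cons]
      have hlen : (digitsRev (n / 10)).length ≤ j := by
        rw [digitsRev_length]
        by_cases hq : 0 < n / 10
        · have := loopRes_bounds (n / 10) hq
          set t := (loopRes (n / 10)).toNat
          by_contra hc
          push Not at hc
          have : (10:Int) ^ j ≤ 10 ^ (t - 1) := pow_le_pow_right₀ (by norm_num) (by omega)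
          omega
        · rw [loopRes_of_nonpos hq]; omega
      have ez : j + 1 - ((digitsRev (n/10)).length + 1) = j - (digitsRev (n/10)).length := by
        omega
      rw [ez]
      simp
    · have hn' : n = 0 := by omega
      subst hn'
      norm_num
      rw [digitsRev_of_nonpos (by norm_num)]
      simp [List.replicate_succ]

lemma toDigitsCore_eq : ∀ (fuel m : Nat) (acc : List Char), 0 < m → m ≤ fuel →
    Nat.toDigitsCore 10 fuel m acc = (dig (m : Int)).map (fun d => Nat.digitChar d.toNat) ++ acc := by
  intro fuel
  induction fuel with
  | zero => intro m acc h1 h2; omega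
  | succ fuel ih =>
    intro m acc h1 h2
    simp only [Nat.toDigitsCore]
    have hdig : digitsRev (m : Int) = ((m % 10 : Nat) : Int) :: digitsRev ((m / 10 : Nat) : Int) := by
      rw [digitsRev_of_pos (by exact_mod_cast h1)]
      congr 1
      · rw [md10]; push_cast; omega
      · congr 1; rw [fd10]; push_cast; omega
    by_cases hq : m / 10 = 0
    · rw [if_pos hq]
      have hdig0 : digitsRev ((m / 10 : Nat) : Int) = [] := by
        rw [hq]; exact digitsRev_of_nonpos (lt_irrefl 0)
      rw [dig, hdig, hdig0]
      have e : ((m:Int) % 10).toNat = m % 10 := by omega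
      simp [e]
    · rw [if_neg hq]
      rw [ih (m / 10) _ (by omega) (by omega)]
      have e : ((m:Int) % 10).toNat = m % 10 := by omega
      simp only [dig, hdig, List.reverse_cons, List.map_append, List.map_cons, List.map_nil, e,
        List.append_assoc, List.cons_append, List.nil_append, Int.toNat_natCast]
lemma toChars_pos {n : Int} (h : 0 < n) :
    PySem.Int.toChars n = (dig n).map (fun d => Nat.digitChar d.toNat) := by
  rw [PySem.Int.toChars]
  rw [if_neg (by omega)]
  rw [Nat.toDigits]
  rw [toDigitsCore_eq (n.toNat + 1) n.toNat [] (by omega) (by omega)]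
  simp [show ((n.toNat : Int)) = n from by omega]

lemma digitChar_eq_zero {d : Int} (h0 : 0 ≤ d) (h9 : d ≤ 9) :
    (Nat.digitChar d.toNat = '0') ↔ d = 0 := by
  interval_cases d <;> simp <;> decide

lemma funA_eq {n : Int} (h : 0 < n) :
    funA n = (PySem.Int.floordiv n (10 ^ ((loopRes n).toNat - 1)),
              PySem.Int.mod n (10 ^ ((loopRes n).toNat - 1)),
              10 ^ ((loopRes n).toNat - 1) - 1,
              decide (2 ≤ (loopRes n).toNat) && ((dig n)[1]? == some 0)) := by
  have h1 := loopRes_bounds n h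
  have hres : (loopRes n - 1).toNat = (loopRes n).toNat - 1 := by omega
  simp only [funA]
  rw [hres]
  have hlen : PySem.Str.len (PySem.Int.toStr n) = ((dig n).length : Int) := by
    rw [PySem.Str.len_eq, PySem.Int.toList_toStr, toChars_pos h]
    simp
  have hget : PySem.Str.pyGet? (PySem.Int.toStr n) 1 =
      ((dig n).map (fun d => Nat.digitChar d.toNat))[1]? := by
    show PySem.Chars.pyGet? (PySem.Int.toStr n).toList 1 = _
    rw [PySem.Int.toList_toStr, toChars_pos h]
    show PySem.List.pyGet? _ 1 = _
    rw [PySem.List.pyGet?_of_nonneg _ (by norm_num : (0:Int) ≤ 1)]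
    norm_num
  rw [hlen, hget]
  have hk : (dig n).length = (loopRes n).toNat := by
    rw [dig, List.length_reverse, digitsRev_length]
  rw [hk]
  simp only [Prod.mk.injEq, true_and]
  simp only [show (1 < (((loopRes n).toNat : Nat) : Int)) ↔ (2 ≤ (loopRes n).toNat) from by omega]
  rcases hg : (dig n)[1]? with _ | d
  · simp [hg]
  · have hd : d ∈ dig n := List.mem_of_getElem? hg
    obtain ⟨hd0, hd9⟩ : 0 ≤ d ∧ d ≤ 9 := by
      rw [dig] at hd
      exact digitsRev_mem_bounds n.toNat n le_rfl d (List.mem_reverse.mp hd)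
    simp only [hg, List.getElem?_map, Option.map_some]
    have hc : (Nat.digitChar d.toNat == '0') = (d == (0:Int)) := by
      by_cases hz : d = 0
      · subst hz; decide
      · have hne : Nat.digitChar d.toNat ≠ '0' := fun hcc => hz ((digitChar_eq_zero hd0 hd9).mp hcc)
        simp [hz, hne]
    simp [hc]

lemma mem_digitsB (i : Int) : i ∈ digitsB ↔ 0 ≤ i ∧ i < 10 := by
  rw [digitsB, PySem.Set.mem_ofList, PySem.List.mem_pyRange_one]

lemma add_of_mem {U : List Int} {i : Int} (h : i ∈ U) : PySem.Set.add U i = U := by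
  simp [PySem.Set.add, PySem.Set.contains, List.contains_eq_mem, h]

lemma add_of_not_mem {U : List Int} {i : Int} (h : i ∉ U) : PySem.Set.add U i = U ++ [i] := by
  simp [PySem.Set.add, PySem.Set.contains, List.contains_eq_mem, h]

lemma mI_append {U : List Int} {i : Int} (h0 : 0 ≤ i) (h9 : i ≤ 9) :
    mI (U ++ [i]) = mI U + 1 := by
  have hc : (decide (i ∈ digitsB)) = true := by
    simp [mem_digitsB]; omega
  simp [mI, PySem.Set.inter, PySem.Set.len, List.filter_append, PySem.Set.contains,
    List.contains_eq_mem, hc]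

lemma countP_mem_swap (xs ys : List Int) (hx : xs.Nodup) (hy : ys.Nodup) :
    xs.countP (fun a => ys.contains a) = ys.countP (fun a => xs.contains a) := by
  rw [List.countP_eq_length_filter, List.countP_eq_length_filter]
  have e1 : xs.filter (fun a => ys.contains a) = xs.filter (fun a => decide (a ∈ ys)) := by
    simp [List.contains_eq_mem]
  have e2 : ys.filter (fun a => xs.contains a) = ys.filter (fun a => decide (a ∈ xs)) := by
    simp [List.contains_eq_mem]
  rw [e1, e2]
  rw [← List.toFinset_card_of_nodup (List.Nodup.filter _ hx),
      ← List.toFinset_card_of_nodup (List.Nodup.filter _ hy)]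
  have f1 : (xs.filter (fun a => decide (a ∈ ys))).toFinset = xs.toFinset ∩ ys.toFinset := by
    ext a; simp [List.mem_filter]
  have f2 : (ys.filter (fun a => decide (a ∈ xs))).toFinset = ys.toFinset ∩ xs.toFinset := by
    ext a; simp [List.mem_filter]
  rw [f1, f2, Finset.inter_comm]

lemma digitsB_eq : digitsB = PySem.List.pyRange 0 10 1 := by
  rw [digitsB, PySem.Set.ofList_eq_self_of_nodup _ (PySem.List.nodup_pyRange_one 0 10)]

lemma mI_count {U : List Int} (hU : U.Nodup) :
    ((PySem.List.pyRange 0 10 1).countP (fun i => U.contains i) : Int) = mI U := by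
  rw [countP_mem_swap (PySem.List.pyRange 0 10 1) U (PySem.List.nodup_pyRange_one 0 10) hU]
  simp only [mI, PySem.Set.len, PySem.Set.inter, PySem.Set.contains, digitsB_eq,
    List.countP_eq_length_filter]

lemma m9I_count {U : List Int} (hU : U.Nodup) :
    ((PySem.List.pyRange 1 10 1).countP (fun i => U.contains i) : Int) = m9I U := by
  rw [countP_mem_swap (PySem.List.pyRange 1 10 1) U (PySem.List.nodup_pyRange_one 1 10) hU]
  simp only [m9I, PySem.Set.len, PySem.Set.inter, PySem.Set.diff, PySem.Set.contains,
    List.countP_eq_length_filter, List.filter_filter]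
  congr 1
  refine congrArg List.length (List.filter_congr ?_)
  intro a _
  rw [Bool.eq_iff_iff]
  simp only [List.contains_eq_mem, PySem.List.mem_pyRange_one, List.mem_singleton,
    digitsB_eq, Bool.and_eq_true, Bool.not_eq_eq_eq_not, Bool.not_true, decide_eq_true_eq,
    decide_eq_false_iff_not]
  omega

lemma sum_map_in_out (ds U : List Int) (vIn vOut : Int) (F : Int → Int)
    (hF : ∀ i ∈ ds, F i = if U.contains i then vIn else vOut) :
    (ds.map F).sum = (ds.countP (fun i => U.contains i) : Int) * vIn
      + ((ds.length : Int) - (ds.countP (fun i => U.contains i) : Int)) * vOut := by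
  induction ds with
  | nil => simp
  | cons d ds ih =>
    have hd := hF d (List.mem_cons_self)
    have ih' := ih (fun i hi => hF i (List.mem_cons_of_mem _ hi))
    rw [List.map_cons, List.sum_cons, ih', List.countP_cons, List.length_cons]
    by_cases hc : U.contains d
    · simp only [hd, hc, if_pos, if_true]
      push_cast
      ring
    · simp only [hd, hc, if_false]
      simp only [Bool.false_eq_true, if_false]
      push_cast
      ring

-- the per-digit contribution of A's inner loop, as a function of the digit
def gA (fuel : Nat) (nn : Int) (st : List Int) (started : Bool) (i : Int) : Int :=
  if !started && i == 0 then recAux fuel nn st false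
  else if PySem.Set.len (PySem.Set.add st i) ≤ 2 then recAux fuel nn (PySem.Set.add st i) true else 0

-- the per-digit contribution of B's inner loop
def gB (used : List Int) (begun : Bool) (L : Int) (d : Int) : Int :=
  if !begun && d == 0 then cntNbB L (PySem.Set.len used) (mI used) (m9I used)
  else if PySem.Set.contains used d then
    (if PySem.Set.len used ≤ 2 then cntB L (PySem.Set.len used) (mI used) else 0)
  else if PySem.Set.len used < 2 then cntB L (PySem.Set.len used + 1) (mI used + 1) else 0

lemma foldl_gA (l : List Int) (fuel : Nat) (nn : Int) (st : List Int) (started : Bool) (a : Int) :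
    l.foldl (fun ans i =>
      if !started && i == 0 then ans + recAux fuel nn st false
      else
        let nee := PySem.Set.add st i
        if PySem.Set.len nee ≤ 2 then ans + recAux fuel nn nee true else ans) a
    = a + (l.map (gA fuel nn st started)).sum := by
  have e : (fun (ans i : Int) =>
      if !started && i == 0 then ans + recAux fuel nn st false
      else
        let nee := PySem.Set.add st i
        if PySem.Set.len nee ≤ 2 then ans + recAux fuel nn nee true else ans)
      = fun ans i => ans + gA fuel nn st started i := by
    funext ans i
    simp only [gA]
    split_ifs <;> ring
  rw [e, PySem.List.foldl_add]

lemma foldl_gB (l : List Int) (used : List Int) (begun : Bool) (L : Int) (a : Int) :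
    l.foldl (fun ans d =>
      if !begun && d == 0 then
        ans + cntNbB L (PySem.Set.len used) (PySem.Set.len (PySem.Set.inter used digitsB))
          (PySem.Set.len (PySem.Set.diff (PySem.Set.inter used digitsB) [0]))
      else if PySem.Set.contains used d then
        (if PySem.Set.len used ≤ 2 then
          ans + cntB L (PySem.Set.len used) (PySem.Set.len (PySem.Set.inter used digitsB)) else ans)
      else if PySem.Set.len used < 2 then
        ans + cntB L (PySem.Set.len used + 1) (PySem.Set.len (PySem.Set.inter used digitsB) + 1)
      else ans) a
    = a + (l.map (gB used begun L)).sum := by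
  have e : (fun (ans d : Int) =>
      if !begun && d == 0 then
        ans + cntNbB L (PySem.Set.len used) (PySem.Set.len (PySem.Set.inter used digitsB))
          (PySem.Set.len (PySem.Set.diff (PySem.Set.inter used digitsB) [0]))
      else if PySem.Set.contains used d then
        (if PySem.Set.len used ≤ 2 then
          ans + cntB L (PySem.Set.len used) (PySem.Set.len (PySem.Set.inter used digitsB)) else ans)
      else if PySem.Set.len used < 2 then
        ans + cntB L (PySem.Set.len used + 1) (PySem.Set.len (PySem.Set.inter used digitsB) + 1)
      else ans)
      = fun ans d => ans + gB used begun L d := by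
    funext ans d
    simp only [gB, mI, m9I]
    split_ifs <;> ring
  rw [e, PySem.List.foldl_add]

-- A's recursion unfolded once, for n > 0, with `fun`'s outputs in closed form
lemma recAux_succ {f : Nat} {n : Int} {U : List Int} {started : Bool} (h : 0 < n) :
    recAux (f+1) n U started =
      ((PySem.List.pyRange 0 (PySem.Int.floordiv n (10 ^ ((loopRes n).toNat - 1))) 1).map
        (gA f (10 ^ ((loopRes n).toNat - 1) - 1) U started)).sum
      + (if PySem.Set.len
            (if decide (2 ≤ (loopRes n).toNat) && ((dig n)[1]? == some 0)
             then PySem.Set.add (PySem.Set.add U (PySem.Int.floordiv n (10 ^ ((loopRes n).toNat - 1)))) 0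
             else PySem.Set.add U (PySem.Int.floordiv n (10 ^ ((loopRes n).toNat - 1)))) ≤ 2
         then recAux f (PySem.Int.mod n (10 ^ ((loopRes n).toNat - 1)))
            (if decide (2 ≤ (loopRes n).toNat) && ((dig n)[1]? == some 0)
             then PySem.Set.add (PySem.Set.add U (PySem.Int.floordiv n (10 ^ ((loopRes n).toNat - 1)))) 0
             else PySem.Set.add U (PySem.Int.floordiv n (10 ^ ((loopRes n).toNat - 1)))) true
         else 0) := by
  conv_lhs => rw [recAux]
  rw [if_neg (by omega), if_neg (by omega), funA_eq h]
  simp only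
  rw [foldl_gA]
  split_ifs <;> ring

-- B's loop unfolded one digit
lemma altLoop_cons (dd : Int) (rest : List Int) (U : List Int) (begun : Bool) (ans : Int) :
    altLoop (dd :: rest) U begun ans =
      (if begun || dd ≠ 0 then
        (if ((PySem.Set.add U dd).length : Int) > 2 then
           ans + ((PySem.List.pyRange 0 dd 1).map (gB U begun (rest.length : Int))).sum
         else altLoop rest (PySem.Set.add U dd) true
           (ans + ((PySem.List.pyRange 0 dd 1).map (gB U begun (rest.length : Int))).sum))
      else altLoop rest U begun
        (ans + ((PySem.List.pyRange 0 dd 1).map (gB U begun (rest.length : Int))).sum)) := by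
  conv_lhs => rw [altLoop]
  simp only
  rw [foldl_gB]
  have hused : (if PySem.Set.contains U dd then U else PySem.Set.add U dd) = PySem.Set.add U dd := by
    by_cases hc : PySem.Set.contains U dd
    · rw [if_pos hc]
      have : dd ∈ U := by
        simpa [PySem.Set.contains, List.contains_eq_mem] using hc
      rw [add_of_mem this]
    · rw [if_neg hc]
  rw [hused]
  simp only [PySem.Set.len]
  rfl

lemma altLoop_add : ∀ (ds : List Int) (U : PySem.Set Int) (b : Bool) (a : Int),
    altLoop ds U b a = a + altLoop ds U b 0 := by
  intro ds
  induction ds with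
  | nil => intro U b a; simp only [altLoop]; ring
  | cons dd rest ih =>
    intro U b a
    rw [altLoop_cons, altLoop_cons]
    split_ifs with h1 h2
    · ring
    · rw [ih]
      conv_rhs => rw [ih]
      ring
    · rw [ih]
      conv_rhs => rw [ih]
      ring

lemma altLoop_zeroskip : ∀ (z : Nat) (t : List Int) (U : List Int) (a : Int),
    (0 : Int) ∈ U → ((U.length : Int)) ≤ 2 →
    altLoop (List.replicate z 0 ++ t) U true a = altLoop t U true a := by
  intro z
  induction z with
  | zero => intro t U a _ _; rfl
  | succ z ih =>
    intro t U a h0 h2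
    rw [List.replicate_succ, List.cons_append, altLoop_cons]
    rw [if_pos (by simp)]
    rw [add_of_mem h0]
    rw [if_neg (by omega)]
    rw [show PySem.List.pyRange 0 0 1 = [] from PySem.List.pyRange_one_eq_nil le_rfl]
    simp only [List.map_nil, List.sum_nil, add_zero]
    exact ih t U a h0 h2

lemma nodup_concat {U : List Int} {i : Int} (h : U.Nodup) (hi : i ∉ U) : (U ++ [i]).Nodup := by
  have h2 : ∀ a ∈ U, ¬ a = i := fun a ha hc => hi (hc ▸ ha)
  simp [List.nodup_append, h]
  exact h2

lemma pow10_pos (L : Nat) : (0:Int) < 10 ^ L := by positivity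

lemma one_le_pow10 (L : Nat) : (1:Int) ≤ 10 ^ L := one_le_pow₀ (by norm_num)

lemma nines_nonneg (L : Nat) : 0 ≤ nines L := by
  have := one_le_pow10 L
  simp only [nines]
  omega

lemma nines_lt_pow (L : Nat) : nines L < 10 ^ L := by
  simp only [nines]; omega

lemma nines_succ_pos (L : Nat) : 0 < nines (L + 1) := by
  have h := one_le_pow10 L
  have e : (10:Int) ^ (L + 1) = 10 * 10 ^ L := by ring
  simp only [nines, e]
  omega

lemma nines_lt_succ (L : Nat) : nines L < nines (L + 1) := by
  have h := one_le_pow10 L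
  have e : (10:Int) ^ (L + 1) = 10 * 10 ^ L := by ring
  simp only [nines, e]
  omega

lemma loopRes_nines (L : Nat) : (loopRes (nines (L + 1))).toNat = L + 1 := by
  apply loopRes_val
  · have h := one_le_pow10 L
    have e : (10:Int) ^ (L + 1) = 10 * 10 ^ L := by ring
    simp only [nines, e]
    omega
  · exact nines_lt_pow (L + 1)

lemma floordiv_nines (L : Nat) : PySem.Int.floordiv (nines (L + 1)) (10 ^ L) = 9 := by
  rw [PySem.Int.floordiv_eq_iff_of_pos (pow10_pos L)]
  have h := one_le_pow10 L
  have e : (10:Int) ^ (L + 1) = 10 * 10 ^ L := by ring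
  simp only [nines, e]
  constructor <;> nlinarith

lemma mod_nines (L : Nat) : PySem.Int.mod (nines (L + 1)) (10 ^ L) = nines L := by
  have h := PySem.Int.floordiv_mul_add_mod (nines (L + 1)) (10 ^ L)
  rw [floordiv_nines] at h
  have e : (10:Int) ^ (L + 1) = 10 * 10 ^ L := by ring
  simp only [nines, e] at h ⊢
  omega

lemma digitsRev_nines_length : ∀ L : Nat, (digitsRev (nines L)).length = L := by
  intro L
  cases L with
  | zero =>
    rw [show nines 0 = 0 from by norm_num [nines], digitsRev_of_nonpos (lt_irrefl 0)]
    rfl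
  | succ L =>
    rw [digitsRev_length, loopRes_nines]

lemma dig_nines : ∀ L : Nat, dig (nines L) = List.replicate L 9 := by
  intro L
  induction L with
  | zero =>
    rw [show nines 0 = 0 from by norm_num [nines]]
    rw [dig, digitsRev_of_nonpos (lt_irrefl 0)]
    rfl
  | succ L ih =>
    have e : nines (L + 1) = 9 * 10 ^ L + nines L := by
      have e2 : (10:Int) ^ (L + 1) = 10 * 10 ^ L := by ring
      simp only [nines, e2]
      ring
    rw [dig, e, digitsRev_split L (nines L) 9 (nines_nonneg L) (nines_lt_pow L) (by norm_num) le_rfl]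
    rw [digitsRev_nines_length, Nat.sub_self]
    simp only [List.append_nil, List.reverse_append, List.reverse_cons, List.reverse_nil,
      List.nil_append, List.cons_append]
    rw [← dig, ih]
    rfl

lemma flag_nines (L : Nat) :
    (decide (2 ≤ (loopRes (nines (L + 1))).toNat) && ((dig (nines (L + 1)))[1]? == some 0)) = false := by
  rw [loopRes_nines, dig_nines, List.getElem?_replicate]
  by_cases h : 1 < L + 1
  · rw [if_pos h]
    simp
  · rw [if_neg h]
    simp

lemma fuel_step {L : Nat} {f : Nat} (hf : (nines (L + 1)).toNat < f + 1) : (nines L).toNat < f := by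
  have h1 := nines_lt_succ L
  have h2 := nines_nonneg L
  have h3 := nines_succ_pos L
  omega

lemma cntB_zero (c m : Int) : cntB 0 c m = 1 := by
  rw [cntB]; rfl

lemma cntB_succ (L : Nat) (c m : Int) :
    cntB ((L : Int) + 1) c m =
      m * cntB L c m + (if c < 2 then (10 - m) * cntB L (c + 1) (m + 1) else 0) := by
  rw [cntB, dif_neg (by omega)]
  simp only [add_sub_cancel_right]
  split_ifs <;> ring

lemma cntNbB_succ (L : Nat) (c m m9 : Int) :
    cntNbB ((L : Int) + 1) c m m9 =
      cntNbB L c m m9 + (if c ≤ 2 then m9 * cntB L c m else 0)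
        + (if c < 2 then (9 - m9) * cntB L (c + 1) (m + 1) else 0) := by
  rw [cntNbB, cntNbB]
  rw [show PySem.List.pyRange 0 ((L : Int) + 1) 1 = PySem.List.pyRange 0 L 1 ++ [(L : Int)] from
    PySem.List.pyRange_one_succ_right (by positivity)]
  rw [List.foldl_append]
  simp only [List.foldl_cons, List.foldl_nil]
  split_ifs <;> ring

lemma gA_true_eval {f : Nat} {L : Nat} {U : List Int} (hU : U.Nodup)
    (hrec : ∀ V : List Int, V.Nodup → (V.length : Int) ≤ 2 →
      recAux f (nines L) V true = cntB L (cI V) (mI V)) :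
    ∀ i : Int, 0 ≤ i → i < 10 →
      gA f (nines L) U true i =
        if U.contains i then (if cI U ≤ 2 then cntB L (cI U) (mI U) else 0)
        else (if cI U + 1 ≤ 2 then cntB L (cI U + 1) (mI U + 1) else 0) := by
  intro i hi0 hi10
  by_cases hm : i ∈ U
  · have hcont : U.contains i = true := by simp [List.contains_eq_mem, hm]
    rw [gA, if_neg (by simp), add_of_mem hm, hcont, if_pos rfl]
    simp only [PySem.Set.len, cI]
    by_cases hc2 : ((U.length : Nat) : Int) ≤ 2
    · rw [if_pos hc2, if_pos hc2, hrec U hU hc2]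
      simp [cI]
    · rw [if_neg hc2, if_neg hc2]
  · have hcont : U.contains i = false := by simp [List.contains_eq_mem, hm]
    rw [gA, if_neg (by simp), add_of_not_mem hm, hcont]
    simp only [Bool.false_eq_true, if_false]
    simp only [PySem.Set.len, cI, List.length_append, List.length_cons, List.length_nil]
    have e : (((U.length + (0 + 1) : Nat)) : Int) = (U.length : Int) + 1 := by push_cast; ring
    rw [show ((U.length + 1 : Nat) : Int) = (U.length : Int) + 1 from by push_cast; ring]
    by_cases hc2 : ((U.length : Nat) : Int) + 1 ≤ 2
    · rw [if_pos hc2, if_pos hc2]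
      rw [hrec (U ++ [i]) (nodup_concat hU hm) (by push_cast; simp; omega)]
      have e2 : mI (U ++ [i]) = mI U + 1 := mI_append hi0 (by omega)
      rw [e2]
      simp [cI]
    · rw [if_neg hc2, if_neg hc2]

lemma recAux_nines_true : ∀ (L : Nat) (fuel : Nat) (U : List Int), U.Nodup →
    (U.length : Int) ≤ 2 → (nines L).toNat < fuel →
    recAux fuel (nines L) U true = cntB L (cI U) (mI U) := by
  intro L
  induction L with
  | zero =>
    intro fuel U hU hc hf
    obtain ⟨f, rfl⟩ : ∃ f, fuel = f + 1 := ⟨fuel - 1, by omega⟩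
    rw [show nines 0 = 0 from by norm_num [nines]]
    rw [recAux, if_pos rfl]
    rw [show ((0:Nat):Int) = 0 from rfl, cntB_zero]
    rfl
  | succ L ih =>
    intro fuel U hU hc hf
    obtain ⟨f, rfl⟩ : ∃ f, fuel = f + 1 := ⟨fuel - 1, by omega⟩
    rw [recAux_succ (nines_succ_pos L)]
    rw [flag_nines]
    simp only [Bool.false_eq_true, if_false]
    rw [loopRes_nines]
    simp only [Nat.add_sub_cancel]
    rw [floordiv_nines, mod_nines]
    simp only [show (10:Int) ^ L - 1 = nines L from rfl]
    have hfs := fuel_step hf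
    have htail : (if PySem.Set.len (PySem.Set.add U 9) ≤ 2
        then recAux f (nines L) (PySem.Set.add U 9) true else 0) = gA f (nines L) U true 9 := by
      simp [gA]
    rw [htail]
    have hr : PySem.List.pyRange 0 10 1 = PySem.List.pyRange 0 9 1 ++ [(9:Int)] := by
      have := PySem.List.pyRange_one_succ_right (a := 0) (b := 9) (by norm_num)
      simpa using this
    have hsum : ((PySem.List.pyRange 0 9 1).map (gA f (nines L) U true)).sum + gA f (nines L) U true 9
        = ((PySem.List.pyRange 0 10 1).map (gA f (nines L) U true)).sum := by
      rw [hr, List.map_append, List.sum_append]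
      simp
    rw [hsum]
    have hrec : ∀ V : List Int, V.Nodup → (V.length : Int) ≤ 2 →
        recAux f (nines L) V true = cntB L (cI V) (mI V) := fun V hV hcV => ih f V hV hcV hfs
    rw [sum_map_in_out _ U _ _ _ (fun i hi => by
      obtain ⟨h0, h10⟩ := PySem.List.mem_pyRange_one.mp hi
      exact gA_true_eval hU hrec i h0 h10)]
    rw [mI_count hU]
    rw [PySem.List.length_pyRange_one]
    rw [show ((10:Int) - 0).toNat = 10 from by decide]
    rw [show (((L:Nat) + 1 : Nat) : Int) = (L : Int) + 1 from by push_cast; ring, cntB_succ]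
    rw [if_pos (show cI U ≤ 2 from hc)]
    simp only [cI]
    split_ifs <;> (first | ring1 | (exfalso; omega))

lemma recAux_nines_false : ∀ (L : Nat) (fuel : Nat) (U : List Int), U.Nodup →
    (nines L).toNat < fuel →
    recAux fuel (nines L) U false = cntNbB L (cI U) (mI U) (m9I U) := by
  intro L
  induction L with
  | zero =>
    intro fuel U hU hf
    obtain ⟨f, rfl⟩ : ∃ f, fuel = f + 1 := ⟨fuel - 1, by omega⟩
    rw [show nines 0 = 0 from by norm_num [nines]]
    rw [recAux, if_pos rfl]
    rw [show ((0:Nat):Int) = 0 from rfl]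
    rw [cntNbB]
    rw [show PySem.List.pyRange 0 (0:Int) 1 = [] from PySem.List.pyRange_one_eq_nil le_rfl]
    rfl
  | succ L ih =>
    intro fuel U hU hf
    obtain ⟨f, rfl⟩ : ∃ f, fuel = f + 1 := ⟨fuel - 1, by omega⟩
    rw [recAux_succ (nines_succ_pos L)]
    rw [flag_nines]
    simp only [Bool.false_eq_true, if_false]
    rw [loopRes_nines]
    simp only [Nat.add_sub_cancel]
    rw [floordiv_nines, mod_nines]
    simp only [show (10:Int) ^ L - 1 = nines L from rfl]
    have hfs := fuel_step hf
    have hrec : ∀ V : List Int, V.Nodup → (V.length : Int) ≤ 2 →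
        recAux f (nines L) V true = cntB L (cI V) (mI V) :=
      fun V hV hcV => recAux_nines_true L f V hV hcV hfs
    have hne9 : (!false && (9:Int) == 0) = false := by decide
    have htail : (if PySem.Set.len (PySem.Set.add U 9) ≤ 2
        then recAux f (nines L) (PySem.Set.add U 9) true else 0) = gA f (nines L) U false 9 := by
      rw [gA, hne9]
      simp
    rw [htail]
    have hr0 : PySem.List.pyRange 0 9 1 = 0 :: PySem.List.pyRange 1 9 1 :=
      PySem.List.pyRange_one_cons (by norm_num)
    rw [hr0]
    simp only [List.map_cons, List.sum_cons]
    have hg0 : gA f (nines L) U false 0 = cntNbB L (cI U) (mI U) (m9I U) := by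
      rw [gA, if_pos (by simp)]
      exact ih f U hU hfs
    rw [hg0]
    have hr9 : PySem.List.pyRange 1 10 1 = PySem.List.pyRange 1 9 1 ++ [(9:Int)] := by
      have := PySem.List.pyRange_one_succ_right (a := 1) (b := 9) (by norm_num)
      simpa using this
    have hsum : ((PySem.List.pyRange 1 9 1).map (gA f (nines L) U false)).sum + gA f (nines L) U false 9
        = ((PySem.List.pyRange 1 10 1).map (gA f (nines L) U false)).sum := by
      rw [hr9, List.map_append, List.sum_append]
      simp
    have hFeval : ∀ i : Int, 1 ≤ i → i < 10 →
        gA f (nines L) U false i =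
          if U.contains i then (if cI U ≤ 2 then cntB L (cI U) (mI U) else 0)
          else (if cI U + 1 ≤ 2 then cntB L (cI U + 1) (mI U + 1) else 0) := by
      intro i h1 h10
      have hne : (!false && i == 0) = false := by
        simp [show i ≠ 0 from by omega]
      have hgg : gA f (nines L) U false i = gA f (nines L) U true i := by
        simp only [gA, hne, Bool.not_true, Bool.false_and, Bool.false_eq_true, if_false]
      rw [hgg]
      exact gA_true_eval hU hrec i (by omega) h10
    calc cntNbB L (cI U) (mI U) (m9I U)
          + ((PySem.List.pyRange 1 9 1).map (gA f (nines L) U false)).sum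
          + gA f (nines L) U false 9
        = cntNbB L (cI U) (mI U) (m9I U)
          + ((PySem.List.pyRange 1 10 1).map (gA f (nines L) U false)).sum := by
          rw [← hsum]; ring
      _ = cntNbB ((L:Int) + 1) (cI U) (mI U) (m9I U) := by
          rw [sum_map_in_out _ U _ _ _ (fun i hi => by
            obtain ⟨h1, h10⟩ := PySem.List.mem_pyRange_one.mp hi
            exact hFeval i h1 h10)]
          rw [m9I_count hU]
          rw [PySem.List.length_pyRange_one]
          rw [show ((10:Int) - 1).toNat = 9 from by decide]
          rw [cntNbB_succ]
          simp only [cI]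
          split_ifs <;> (first | ring1 | (exfalso; omega))
      _ = cntNbB (((L + 1 : Nat) : Int)) (cI U) (mI U) (m9I U) := by
          norm_num

lemma diglen_le {j : Nat} {y : Int} (h0 : 0 ≤ y) (hy : y < 10 ^ j) :
    (dig y).length ≤ j := by
  rw [dig, List.length_reverse, digitsRev_length]
  by_cases hp : 0 < y
  · obtain ⟨g1, g2, g3⟩ := loopRes_bounds y hp
    by_contra hc
    push Not at hc
    have : (10:Int) ^ j ≤ 10 ^ ((loopRes y).toNat - 1) :=
      pow_le_pow_right₀ (by norm_num) (by omega)
    omega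
  · rw [loopRes_of_nonpos hp]
    omega

lemma decomp (n : Int) (hpos : 0 < n) :
    dig n = (PySem.Int.floordiv n (10 ^ ((loopRes n).toNat - 1))) ::
      (List.replicate ((loopRes n).toNat - 1
          - (dig (PySem.Int.mod n (10 ^ ((loopRes n).toNat - 1)))).length) 0
        ++ dig (PySem.Int.mod n (10 ^ ((loopRes n).toNat - 1)))) ∧
    1 ≤ PySem.Int.floordiv n (10 ^ ((loopRes n).toNat - 1)) ∧
    PySem.Int.floordiv n (10 ^ ((loopRes n).toNat - 1)) ≤ 9 ∧
    0 ≤ PySem.Int.mod n (10 ^ ((loopRes n).toNat - 1)) ∧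
    PySem.Int.mod n (10 ^ ((loopRes n).toNat - 1)) < 10 ^ ((loopRes n).toNat - 1) := by
  obtain ⟨g1, g2, g3⟩ := loopRes_bounds n hpos
  set K := (loopRes n).toNat - 1 with hK
  have hkk : (loopRes n).toNat = K + 1 := by omega
  rw [hkk] at g3
  have hPp : (0:Int) < 10 ^ K := pow10_pos K
  have e10 : (10:Int) ^ (K + 1) = 10 * 10 ^ K := by ring
  rw [PySem.Int.floordiv_eq_ediv_of_pos hPp, PySem.Int.mod_eq_emod_of_pos hPp]
  have hx1 : 1 ≤ n / 10 ^ K := by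
    rw [Int.le_ediv_iff_mul_le hPp]
    omega
  have hx9 : n / 10 ^ K ≤ 9 := by
    by_contra hc
    push Not at hc
    have : 10 * 10 ^ K ≤ (n / 10 ^ K) * 10 ^ K := by nlinarith
    have h2 := Int.ediv_mul_le n (show (10:Int)^K ≠ 0 from by omega)
    omega
  have hy0 : 0 ≤ n % 10 ^ K := Int.emod_nonneg n (by omega)
  have hyP : n % 10 ^ K < 10 ^ K := Int.emod_lt_of_pos n hPp
  refine ⟨?_, hx1, hx9, hy0, hyP⟩
  have hsplit := digitsRev_split K (n % 10 ^ K) (n / 10 ^ K) hy0 hyP hx1 hx9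
  have hn : (n / 10 ^ K) * 10 ^ K + n % 10 ^ K = n := by
    have h := Int.ediv_add_emod n (10 ^ K)
    rw [mul_comm] at h
    exact h
  rw [hn] at hsplit
  rw [dig, hsplit]
  simp only [List.reverse_append, List.reverse_cons, List.reverse_nil, List.nil_append,
    List.cons_append, List.reverse_replicate, dig, List.length_reverse]

lemma dig_head_pos {y : Int} (hy : 0 < y) :
    ∃ h t, dig y = h :: t ∧ 1 ≤ h := by
  obtain ⟨hd, _, _, _, _⟩ := decomp y hy
  exact ⟨_, _, hd, (decomp y hy).2.1⟩

lemma len_add_ge (s : List Int) (i : Int) : s.length ≤ (PySem.Set.add s i).length := by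
  rw [PySem.Set.add]
  split_ifs
  · exact le_refl _
  · simp

lemma gA_gB_eval {f K : Nat} {U : List Int} (hU : U.Nodup) (hf : (nines K).toNat < f)
    (started : Bool) :
    ∀ i : Int, 0 ≤ i → i < 10 → gA f (nines K) U started i = gB U started (K : Int) i := by
  have hrec : ∀ V : List Int, V.Nodup → (V.length : Int) ≤ 2 →
      recAux f (nines K) V true = cntB K (cI V) (mI V) :=
    fun V hV hcV => recAux_nines_true K f V hV hcV hf
  intro i h0 h10
  by_cases hs : (!started && i == 0) = true
  · rw [gA, if_pos hs, gB, if_pos hs]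
    rw [recAux_nines_false K f U hU hf]
    simp [cI, PySem.Set.len, mI, m9I]
  · rw [Bool.not_eq_true] at hs
    have hgg : gA f (nines K) U started i = gA f (nines K) U true i := by
      simp only [gA, hs, Bool.not_true, Bool.false_and, Bool.false_eq_true, if_false]
    rw [hgg, gA_true_eval hU hrec i h0 h10, gB, if_neg (show ¬ ((!started && i == 0) = true) from by simp [hs])]
    simp only [cI, PySem.Set.len, mI, m9I, PySem.Set.contains]
    split_ifs <;> (first | rfl | omega | (exfalso; omega))

lemma main_eq : ∀ (fuel : Nat) (n : Int) (U : List Int) (started : Bool),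
    0 < n → n.toNat < fuel → U.Nodup →
    recAux fuel n U started = altLoop (dig n) U started 0 := by
  intro fuel
  induction fuel with
  | zero => intro n U started h hf _; omega
  | succ f ih =>
    intro n U started hpos hf hU
    obtain ⟨g1, g2, g3⟩ := loopRes_bounds n hpos
    obtain ⟨hdig, hx1, hx9, hy0, hyP⟩ := decomp n hpos
    set K := (loopRes n).toNat - 1 with hK
    set x := PySem.Int.floordiv n (10 ^ K) with hxdef
    set y := PySem.Int.mod n (10 ^ K) with hydef
    set z := K - (dig y).length with hz
    have hlenle : (dig y).length ≤ K := diglen_le hy0 hyP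
    have hrestlen : (List.replicate z 0 ++ dig y).length = K := by
      simp only [List.length_append, List.length_replicate]
      omega
    have hfK : (nines K).toNat < f := by
      have h1 : nines K < n := lt_of_lt_of_le (nines_lt_pow K) g2
      have h2 := nines_nonneg K
      omega
    have hyf : y.toNat < f := by
      have : y < n := lt_of_lt_of_le hyP g2
      omega
    have hrecy : ∀ V : List Int, V.Nodup → recAux f y V true = altLoop (dig y) V true 0 := by
      intro V hV
      rcases Int.lt_or_le 0 y with hy | hy
      · exact ih y V true hy hyf hV
      · have hy' : y = 0 := by omega
        obtain ⟨f', rfl⟩ : ∃ f', f = f' + 1 := ⟨f - 1, by omega⟩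
        rw [hy', recAux, if_pos rfl]
        simp [dig, digitsRev_of_nonpos (lt_irrefl 0), altLoop]
    -- A side
    rw [recAux_succ hpos]
    rw [← hK, ← hxdef, ← hydef]
    simp only [show (10:Int) ^ K - 1 = nines K from rfl]
    set flg := (decide (2 ≤ (loopRes n).toNat) && ((dig n)[1]? == some 0)) with hflg
    -- B side
    rw [hdig]
    rw [altLoop_cons]
    rw [if_pos (show (started || decide (x ≠ 0)) = true from by
      simp [show x ≠ 0 from by omega])]
    rw [hrestlen]
    -- the two inner sums agree
    have hsum : ((PySem.List.pyRange 0 x 1).map (gA f (nines K) U started)).sum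
        = ((PySem.List.pyRange 0 x 1).map (gB U started (K : Int))).sum := by
      congr 1
      apply List.map_congr_left
      intro i hi
      obtain ⟨h0, hix⟩ := PySem.List.mem_pyRange_one.mp hi
      exact gA_gB_eval hU hfK started i h0 (by omega)
    rw [hsum]
    set S := ((PySem.List.pyRange 0 x 1).map (gB U started (K : Int))).sum with hS
    have hneeU : (PySem.Set.add U x).Nodup := PySem.Set.nodup_add U x hU
    -- tight step
    by_cases hbig : ((PySem.Set.add U x).length : Int) > 2
    · rw [if_pos hbig]
      have hge := len_add_ge (PySem.Set.add U x) 0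
      have htail0 : ¬ (PySem.Set.len
          (if flg = true
           then PySem.Set.add (PySem.Set.add U x) 0 else PySem.Set.add U x) ≤ 2) := by
        simp only [PySem.Set.len]
        split_ifs <;> omega
      rw [if_neg htail0]
      omega
    · rw [if_neg hbig]
      push Not at hbig
      rw [altLoop_add]
      by_cases hzz : z = 0
      · -- no padding zeros: the flag is false
        have hflag : flg = false := by
          rw [hflg, hdig, hzz]
          simp only [List.replicate_zero, List.nil_append, List.getElem?_cons_succ]
          rcases Int.lt_or_le 0 y with hy | hy
          · obtain ⟨h, t, hht, hh1⟩ := dig_head_pos hy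
            rw [hht]
            simp only [List.getElem?_cons_succ, List.getElem?_cons_zero]
            simp [show ¬ (h = 0) from by omega]
          · have hy' : y = 0 := by omega
            have hKz : K = 0 := by
              have : (dig y).length = 0 := by
                rw [hy', dig, digitsRev_of_nonpos (lt_irrefl 0)]
                rfl
              omega
            have h1 : (loopRes n).toNat = 1 := by omega
            simp [h1]
        rw [hflag]
        simp only [Bool.false_eq_true, if_false]
        rw [hzz]
        simp only [List.replicate_zero, List.nil_append]
        by_cases hok : PySem.Set.len (PySem.Set.add U x) ≤ 2
        · rw [if_pos hok, hrecy (PySem.Set.add U x) hneeU]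
          ring
        · exfalso
          simp only [PySem.Set.len] at hok
          omega
      · -- padding zeros: the flag is true and B consumes them one by one
        have hz1 : 1 ≤ z := by omega
        have hflag : flg = true := by
          rw [hflg, hdig]
          obtain ⟨z', hzz'⟩ : ∃ z', z = z' + 1 := ⟨z - 1, by omega⟩
          rw [hzz']
          simp only [List.replicate_succ, List.cons_append, List.getElem?_cons_succ,
            List.getElem?_cons_zero]
          have hK1 : 2 ≤ (loopRes n).toNat := by omega
          simp [hK1]
        rw [hflag]
        simp only [if_true]
        obtain ⟨z', hzz'⟩ : ∃ z', z = z' + 1 := ⟨z - 1, by omega⟩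
        rw [hzz', List.replicate_succ, List.cons_append, altLoop_cons]
        rw [if_pos (show (true || decide ((0:Int) ≠ 0)) = true from by simp)]
        rw [show PySem.List.pyRange 0 (0:Int) 1 = [] from PySem.List.pyRange_one_eq_nil le_rfl]
        simp only [List.map_nil, List.sum_nil, add_zero]
        have hnodup2 : (PySem.Set.add (PySem.Set.add U x) 0).Nodup :=
          PySem.Set.nodup_add _ 0 hneeU
        by_cases hbig2 : (((PySem.Set.add (PySem.Set.add U x) 0).length : Nat) : Int) > 2
        · rw [if_pos hbig2, if_neg (by simp only [PySem.Set.len]; omega)]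
          ring
        · rw [if_neg hbig2, if_pos (by simp only [PySem.Set.len]; omega)]
          have h0mem : (0:Int) ∈ PySem.Set.add (PySem.Set.add U x) 0 := by
            rw [PySem.Set.mem_add]
            right
            rfl
          rw [altLoop_zeroskip z' (dig y) _ _ h0mem (by omega)]
          rw [hrecy _ hnodup2]
          ring

-- ===== VERDICT (by name: the statement is the Claim_ definition above) =====
theorem rec_spec : Claim_equal_rec := by
  intro n st started _ hpre
  obtain ⟨hn, hnd⟩ := hpre
  unfold Spec_rec rec rec_alt
  rcases lt_or_eq_of_le hn with hpos | hzero
  · rw [if_neg (by omega)]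
    rw [PySem.Set.ofList_eq_self_of_nodup st hnd]
    exact main_eq (n.toNat + 1) n st started hpos (by omega) hnd
  · subst hzero
    simp [recAux]
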